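-- pv_equiv track=rewrite | github.com/Vardhan-225/Amoskys | src/amoskys/agents/shared/internet_activity/probes.py | _matches_domain_set
-- ===== SOURCE A (Python) =====
-- from typing import Any, Dict, List, Optional, Set
--
-- def _matches_domain_set(hostname: Optional[str], domain_set: frozenset) -> bool:
--     """Check if hostname matches any domain in the set."""
--     if not hostname:
--         return False
--     hostname_lower = hostname.lower()
--     for domain in domain_set:
--         if hostname_lower == domain or hostname_lower.endswith("." + domain):
--             return True
--     return False
-- ===== SOURCE B (Python) =====
-- def _matches_domain_set(hostname, domain_set):
--     """Check if hostname matches any domain in the set."""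
--     if not hostname:
--         return False
--     cand = hostname.lower()
--     if cand in domain_set:
--         return True
--     while True:
--         _, sep, cand = cand.partition(".")
--         if not sep:
--             return False
--         if cand in domain_set:
--             return True
-- ===== Notes on version B (the rewrite author's own statement) =====
-- stated objective: faster
-- what changed: Instead of scanning every domain in the set and testing equality/endswith against the hostname, B enumerates the hostname's own dot-suffix candidates and probes each with an O(1) frozenset membership test.
import Mathlib
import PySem

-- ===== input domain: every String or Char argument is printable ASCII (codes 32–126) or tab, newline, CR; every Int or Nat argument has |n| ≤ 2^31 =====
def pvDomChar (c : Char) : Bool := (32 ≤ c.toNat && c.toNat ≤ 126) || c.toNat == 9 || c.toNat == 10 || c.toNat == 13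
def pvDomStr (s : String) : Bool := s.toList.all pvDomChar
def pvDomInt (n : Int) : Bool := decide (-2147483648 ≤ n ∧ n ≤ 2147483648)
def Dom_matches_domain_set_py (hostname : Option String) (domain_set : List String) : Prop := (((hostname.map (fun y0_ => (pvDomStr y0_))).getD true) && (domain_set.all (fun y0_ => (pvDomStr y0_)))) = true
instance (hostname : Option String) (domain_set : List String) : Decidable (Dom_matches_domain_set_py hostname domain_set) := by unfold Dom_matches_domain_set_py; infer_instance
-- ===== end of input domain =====

-- B replaces A's scan over the whole domain set with an enumeration of the hostname's
-- own dot-suffix candidates, each probed by set membership (objective: faster).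

-- ===== PORT A =====
-- the for-loop with early 'return True'
def pvLoopA (hl : String) : List String → Bool
  | [] => false
  | d :: rest => if hl = d || PySem.Str.endswith hl ("." ++ d) then true else pvLoopA hl rest

def matches_domain_set_py (hostname : Option String) (domain_set : List String) : Bool :=
  match hostname with
  | none => false
  | some h =>
    if h = "" then false
    else pvLoopA (PySem.Str.lower h) domain_set

-- ===== PORT B =====
-- cand.partition(".")[2] when "." occurs (none ↔ empty separator part), ported on the character list
def pvAfterDot : List Char → Option (List Char)
  | [] => none
  | c :: cs => if c = '.' then some cs else pvAfterDot cs

theorem pvAfterDot_length : ∀ (cs r : List Char), pvAfterDot cs = some r → r.length < cs.length := by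
  intro cs
  induction cs with
  | nil => intro r h; simp [pvAfterDot] at h
  | cons c cs ih =>
    intro r hr
    by_cases hc : c = '.'
    · simp [pvAfterDot, hc] at hr; simp [← hr]
    · simp [pvAfterDot, hc] at hr
      exact Nat.lt_trans (ih r hr) (by simp)

-- the 'while True' loop of Source B
def pvLoopB (ds : List String) (cs : List Char) : Bool :=
  match h : pvAfterDot cs with
  | none => false
  | some r => if ds.contains (String.ofList r) then true else pvLoopB ds r
termination_by cs.length
decreasing_by exact pvAfterDot_length _ _ h

def matches_domain_set_py_alt (hostname : Option String) (domain_set : List String) : Bool :=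
  match hostname with
  | none => false
  | some h =>
    if h = "" then false
    else
      let cand := PySem.Str.lower h
      if domain_set.contains cand then true
      else pvLoopB domain_set cand.toList

-- ===== PRECONDITION & SPEC =====
def Spec_matches_domain_set_py (hostname : Option String) (domain_set : List String) (out : Bool) : Prop := out = matches_domain_set_py_alt hostname domain_set
instance (hostname : Option String) (domain_set : List String) (out : Bool) : Decidable (Spec_matches_domain_set_py hostname domain_set out) := by unfold Spec_matches_domain_set_py; infer_instance

-- ===== CLAIM (what is proved, stated in full; the proofs are below) =====
def Claim_equal_matches_domain_set_py : Prop := ∀ (hostname : Option String) (domain_set : List String), Dom_matches_domain_set_py hostname domain_set → Spec_matches_domain_set_py hostname domain_set (matches_domain_set_py hostname domain_set)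

-- ===== LEMMAS AND PROOFS =====

theorem pvLoopA_eq_any (hl : String) (ds : List String) :
    pvLoopA hl ds = ds.any (fun d => hl == d || PySem.Str.endswith hl ("." ++ d)) := by
  induction ds with
  | nil => simp [pvLoopA]
  | cons d rest ih =>
    rw [Bool.eq_iff_iff]
    simp [pvLoopA, ih, or_assoc]

theorem pv_endswith_dot (hl d : String) :
    PySem.Str.endswith hl ("." ++ d) = decide (('.' :: d.toList) <:+ hl.toList) := by
  have hcat : ("." ++ d).toList = '.' :: d.toList := by simp
  rw [Bool.eq_iff_iff, decide_eq_true_iff]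
  simp only [PySem.Str.endswith_eq, hcat]
  exact PySem.Chars.endswith_iff _ _

theorem pv_suffix_dot_iff (d cs : List Char) :
    ('.' :: d) <:+ cs ↔ (match pvAfterDot cs with
      | none => False
      | some r => d = r ∨ ('.' :: d) <:+ r) := by
  induction cs with
  | nil => simp [pvAfterDot]
  | cons c cs ih =>
    rw [List.suffix_cons_iff]
    by_cases hc : c = '.'
    · subst hc
      simp [pvAfterDot]
    · simp only [pvAfterDot, if_neg hc]
      constructor
      · rintro (h | h)
        · exact absurd (List.cons_eq_cons.mp h).1 (Ne.symm hc)
        · exact ih.mp h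
      · intro h; exact Or.inr (ih.mpr h)

theorem pvLoopB_eq_any (ds : List String) (cs : List Char) :
    pvLoopB ds cs = ds.any (fun d => decide (('.' :: d.toList) <:+ cs)) := by
  induction cs using pvLoopB.induct (ds := ds) with
  | case1 cs h =>
    rw [pvLoopB, h]; dsimp only
    symm
    simp only [List.any_eq_false, decide_eq_true_iff]
    intro d _ hsuf
    have hm := (pv_suffix_dot_iff d.toList cs).mp hsuf
    rw [h] at hm
    exact hm
  | case2 cs r h hmem =>
    rw [pvLoopB, h]; dsimp only
    rw [if_pos hmem]
    symm
    rw [List.any_eq_true]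
    rw [List.contains_eq_any_beq, List.any_eq_true] at hmem
    obtain ⟨d, hd, hbeq⟩ := hmem
    refine ⟨d, hd, ?_⟩
    have hdr : d.toList = r := by
      have hde : String.ofList r = d := by simpa using hbeq
      simp [← hde]
    rw [decide_eq_true_iff, pv_suffix_dot_iff, h]
    exact Or.inl hdr
  | case3 cs r h hmem ih =>
    rw [pvLoopB, h]; dsimp only; rw [if_neg hmem, ih]
    rw [Bool.eq_iff_iff]
    simp only [List.any_eq_true, decide_eq_true_iff]
    constructor
    · rintro ⟨d, hd, hsuf⟩
      refine ⟨d, hd, ?_⟩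
      rw [pv_suffix_dot_iff, h]
      exact Or.inr hsuf
    · rintro ⟨d, hd, hsuf⟩
      rw [pv_suffix_dot_iff, h] at hsuf
      rcases hsuf with heq | hsuf
      · exfalso
        apply hmem
        rw [List.contains_eq_any_beq, List.any_eq_true]
        exact ⟨d, hd, by rw [← heq]; simp⟩
      · exact ⟨d, hd, hsuf⟩

-- ===== VERDICT (by name: the statement is the Claim_ definition above) =====
theorem matches_domain_set_py_spec : Claim_equal_matches_domain_set_py := by
  intro hostname ds _
  unfold Spec_matches_domain_set_py matches_domain_set_py matches_domain_set_py_alt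
  match hostname with
  | none => rfl
  | some h =>
    by_cases hh : h = ""
    · simp [hh]
    · simp only [if_neg hh]
      have hB : (if ds.contains (PySem.Str.lower h) = true then true
            else pvLoopB ds (PySem.Str.lower h).toList)
          = (ds.contains (PySem.Str.lower h) || pvLoopB ds (PySem.Str.lower h).toList) := by
        cases hcon : ds.contains (PySem.Str.lower h) <;> simp [hcon]
      rw [hB, pvLoopA_eq_any, pvLoopB_eq_any, Bool.eq_iff_iff]
      simp only [Bool.or_eq_true, List.contains_eq_any_beq, List.any_eq_true, Bool.or_eq_true,
        beq_iff_eq, pv_endswith_dot, decide_eq_true_iff]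
      constructor
      · rintro ⟨d, hd, heq | hsuf⟩
        · exact Or.inl ⟨d, hd, heq⟩
        · exact Or.inr ⟨d, hd, hsuf⟩
      · rintro (⟨d, hd, heq⟩ | ⟨d, hd, hsuf⟩)
        · exact ⟨d, hd, Or.inl heq⟩
        · exact ⟨d, hd, Or.inr hsuf⟩
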